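-- pv_equiv track=rewrite | github.com/alesapin/RussianMorphParsing | dicttranslator/base.py | pretty_morpheme
-- ===== SOURCE A (Python) =====
-- def pretty_morpheme(word, labels):
--     start = 0
--     result = []
--     if len(word) == 1:
--         return word + ':' + labels[0]
--
--     current_label = labels[0].split('B-')[1]
--     current_word = word[0]
--     word_index = 1
--     for label in labels[1:]:
--         if label.startswith('B-'):
--             result.append(current_word + ':' + current_label)
--             current_word = word[word_index]
--             current_label = label.split('B-')[1]
--         else:
--             current_word += word[word_index]
--         word_index += 1
--
--     result.append(current_word + ':' + current_label)
--     return '/'.join(result)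
-- ===== SOURCE B (Python) =====
-- def pretty_morpheme(word, labels):
--     if len(word) == 1:
--         return word + ':' + labels[0]
--     # boundary indices: 0 plus every later position whose label starts with 'B-'
--     starts = [0] + [i for i in range(1, len(labels)) if labels[i].startswith('B-')]
--     ends = starts[1:] + [len(labels)]
--     return '/'.join(word[a:b] + ':' + labels[a].split('B-')[1]
--                     for a, b in zip(starts, ends))
-- ===== Notes on version B (the rewrite author's own statement) =====
-- stated objective: alternative
-- what changed: Replaces A's character-by-character accumulator loop with index arithmetic: compute the list of boundary positions (0 plus every later B- label), pair consecutive boundaries, and slice the word between them, formatting each slice with the stripped label at its start.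
import Mathlib
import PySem

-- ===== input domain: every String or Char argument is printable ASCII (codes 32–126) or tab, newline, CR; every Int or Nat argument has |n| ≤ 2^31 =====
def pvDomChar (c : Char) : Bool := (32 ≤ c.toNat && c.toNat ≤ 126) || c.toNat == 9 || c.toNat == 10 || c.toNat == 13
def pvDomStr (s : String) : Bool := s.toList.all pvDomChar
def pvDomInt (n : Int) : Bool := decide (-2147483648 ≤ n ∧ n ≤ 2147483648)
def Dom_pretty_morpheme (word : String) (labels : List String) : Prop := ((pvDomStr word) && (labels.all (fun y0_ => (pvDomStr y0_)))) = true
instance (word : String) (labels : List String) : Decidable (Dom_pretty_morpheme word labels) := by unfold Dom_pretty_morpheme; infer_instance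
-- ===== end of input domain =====

-- B replaces A's character accumulator loop by boundary-index arithmetic: it computes the
-- boundary positions and slices the word between consecutive boundaries; objective: alternative.

-- label.split('B-')[1] (IndexError = absent 'B-' is excluded by Pre_; getD is exact in range)
def pmStrip (l : String) : List Char :=
  (PySem.Chars.splitOn l.toList "B-".toList).getD 1 []

-- ===== PORT A =====
-- A's loop over labels[1:]; state = (result, current_word, current_label, word_index).
-- word[word_index] is ported as getD (in range under Pre_); labels[0] as headD (labels ≠ [] under Pre_).
def pmLoopA (wl : List Char) : List String → List (List Char) → List Char → List Char → Nat →
    List (List Char) × List Char × List Char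
  | [], result, cw, cl, _ => (result, cw, cl)
  | label :: rest, result, cw, cl, wi =>
    if PySem.Str.startswith label "B-" then
      pmLoopA wl rest (result ++ [cw ++ ':' :: cl])
        [wl.getD wi ' '] (pmStrip label) (wi + 1)
    else
      pmLoopA wl rest result (cw ++ [wl.getD wi ' ']) cl (wi + 1)

def pretty_morpheme (word : String) (labels : List String) : String :=
  let wl := word.toList
  if wl.length == 1 then
    String.ofList (wl ++ ':' :: (labels.headD "").toList)
  else
    let cl0 := pmStrip (labels.headD "")
    let cw0 := [wl.getD 0 ' ']
    let (result, cw, cl) := pmLoopA wl (labels.drop 1) [] cw0 cl0 1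
    String.ofList (PySem.Chars.join "/".toList (result ++ [cw ++ ':' :: cl]))

-- ===== PORT B =====
-- Source B: starts = [0] + [i for i in range(1, len(labels)) if labels[i].startswith('B-')]
def pmStartsB (labels : List String) : List Int :=
  0 :: (PySem.List.pyRange 1 labels.length 1).filter
        (fun i => PySem.Str.startswith (PySem.List.pyGetD labels i "") "B-")

-- word[a:b] + ':' + labels[a].split('B-')[1] (labels[a] is in range: a is a boundary index)
def pmFmt (wl : List Char) (labels : List String) (ab : Int × Int) : List Char :=
  PySem.List.slice wl (some ab.1) (some ab.2) ++ ':' :: pmStrip (PySem.List.pyGetD labels ab.1 "")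

def pretty_morpheme_alt (word : String) (labels : List String) : String :=
  let wl := word.toList
  if wl.length == 1 then
    String.ofList (wl ++ ':' :: (labels.headD "").toList)
  else
    let starts := pmStartsB labels
    let ends := starts.drop 1 ++ [(labels.length : Int)]
    String.ofList (PySem.Chars.join "/".toList ((starts.zip ends).map (pmFmt wl labels)))

-- ===== PRECONDITION & SPEC =====
-- Pre_ excludes exactly the inputs where Python A raises: empty labels (IndexError on labels[0]);
-- and, when len(word) ≠ 1: 'B-' absent from labels[0] (IndexError on split('B-')[1]), empty word,
-- or more labels than characters (IndexError on word[word_index]).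
def Pre_pretty_morpheme (word : String) (labels : List String) : Prop :=
  labels ≠ [] ∧
  (word.toList.length = 1 ∨
    (PySem.Str.isIn "B-" (labels.headD "") = true ∧
      1 ≤ word.toList.length ∧ labels.length ≤ word.toList.length))
instance (word : String) (labels : List String) : Decidable (Pre_pretty_morpheme word labels) := by
  unfold Pre_pretty_morpheme; infer_instance

def pvWitness_pretty_morpheme : String × List String := ("abc", ["B-root", "I-root", "B-suf"])

def Spec_pretty_morpheme (word : String) (labels : List String) (out : String) : Prop := out = pretty_morpheme_alt word labels
instance (word : String) (labels : List String) (out : String) : Decidable (Spec_pretty_morpheme word labels out) := by unfold Spec_pretty_morpheme; infer_instance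

-- ===== CLAIM (what is proved, stated in full; the proofs are below) =====
def Claim_equal_pretty_morpheme : Prop := ∀ (word : String) (labels : List String), Dom_pretty_morpheme word labels → Pre_pretty_morpheme word labels → Spec_pretty_morpheme word labels (pretty_morpheme word labels)

-- ===== LEMMAS AND PROOFS =====

-- common specification: the list of formatted segments, as a recursion over the remaining labels
def pmSegs (wl : List Char) : List String → List Char → List Char → Nat → List (List Char)
  | [], cw, cl, _ => [cw ++ ':' :: cl]
  | label :: rest, cw, cl, wi =>
    if PySem.Str.startswith label "B-" then
      (cw ++ ':' :: cl) :: pmSegs wl rest [wl.getD wi ' '] (pmStrip label) (wi + 1)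
    else
      pmSegs wl rest (cw ++ [wl.getD wi ' ']) cl (wi + 1)

-- boundary positions of rest, rest starting at absolute index k
def pmBnds : List String → Nat → List Int
  | [], _ => []
  | l :: r, k => if PySem.Str.startswith l "B-" then (k : Int) :: pmBnds r (k + 1) else pmBnds r (k + 1)

theorem pmLoopA_segs (wl : List Char) (rest : List String) (result : List (List Char))
    (cw cl : List Char) (wi : Nat) :
    (pmLoopA wl rest result cw cl wi).1 ++
      [(pmLoopA wl rest result cw cl wi).2.1 ++ ':' :: (pmLoopA wl rest result cw cl wi).2.2]
      = result ++ pmSegs wl rest cw cl wi := by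
  induction rest generalizing result cw cl wi with
  | nil => simp [pmLoopA, pmSegs]
  | cons label rest ih =>
    by_cases h : PySem.Str.startswith label "B-" = true
    · simp only [pmLoopA, pmSegs, if_pos h]
      rw [ih]; simp
    · simp only [pmLoopA, pmSegs, if_neg h]
      rw [ih]

theorem pmBnds_filter (ls : List String) (rest : List String) (k : Nat)
    (hdrop : ls.drop k = rest) :
    (PySem.List.pyRange (k : Int) (ls.length : Int) 1).filter
        (fun i => PySem.Str.startswith (PySem.List.pyGetD ls i "") "B-")
      = pmBnds rest k := by
  induction rest generalizing k with
  | nil =>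
    have hk : ls.length ≤ k := by
      have := List.drop_eq_nil_iff.mp hdrop; omega
    rw [PySem.List.pyRange_one_eq_nil (by exact_mod_cast hk)]
    rfl
  | cons l r ih =>
    have hklt : k < ls.length := by
      by_contra h
      rw [List.drop_eq_nil_iff.mpr (by omega)] at hdrop; exact (List.cons_ne_nil _ _) hdrop.symm
    have hget : ls[k]? = some l := by
      have : (ls.drop k)[0]? = some l := by rw [hdrop]; rfl
      simpa [List.getElem?_drop] using this
    have hgetD : PySem.List.pyGetD ls (k : Int) "" = l := by
      simp [PySem.List.pyGetD_natCast, List.getD, hget]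
    have hdrop' : ls.drop (k + 1) = r := by
      have : (ls.drop k).tail = r := by rw [hdrop]; rfl
      simpa [List.tail_drop] using this
    rw [PySem.List.pyRange_one_cons (by exact_mod_cast hklt), List.filter_cons]
    simp only [hgetD, pmBnds]
    by_cases h : PySem.Str.startswith l "B-" = true
    · rw [if_pos h, if_pos h]
      rw [show ((k : Int) + 1) = ((k + 1 : Nat) : Int) by push_cast; ring]
      rw [ih (k + 1) hdrop']
    · rw [if_neg h, if_neg h]
      rw [show ((k : Int) + 1) = ((k + 1 : Nat) : Int) by push_cast; ring]
      rw [ih (k + 1) hdrop']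

-- cw grows as a slice: appending the next char extends the take by one
theorem take_drop_snoc (wl : List Char) (a wi : Nat) (ha : a ≤ wi) (hw : wi < wl.length) :
    (wl.drop a).take (wi - a) ++ [wl.getD wi ' '] = (wl.drop a).take (wi + 1 - a) := by
  have h1 : wi + 1 - a = (wi - a) + 1 := by omega
  have h2 : (wl.drop a)[wi - a]? = some (wl.getD wi ' ') := by
    rw [List.getElem?_drop]
    have : a + (wi - a) = wi := by omega
    rw [this, List.getD, List.getElem?_eq_getElem hw]
    rfl
  rw [h1, List.take_add_one, h2]
  rfl

-- the key correspondence: B's zipped boundary pairs format to exactly A's segments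
theorem pmZip_segs (wl : List Char) (ls : List String) (rest : List String) (a wi : Nat)
    (hdrop : ls.drop wi = rest) (ha : a ≤ wi) (hwi : wi ≤ ls.length)
    (hwl : ls.length ≤ wl.length) :
    (((a : Int) :: pmBnds rest wi).zip (pmBnds rest wi ++ [(ls.length : Int)])).map
        (pmFmt wl ls)
      = pmSegs wl rest ((wl.drop a).take (wi - a)) (pmStrip (ls.getD a "")) wi := by
  induction rest generalizing a wi with
  | nil =>
    have hle : ls.length ≤ wi := by
      have := List.drop_eq_nil_iff.mp hdrop; omega
    have hwin : wi = ls.length := by omega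
    simp only [pmBnds, pmSegs, List.nil_append, List.zip_cons_cons, List.zip_nil_right,
      List.map_cons, List.map_nil]
    rw [pmFmt, PySem.List.slice_natCast]
    simp [PySem.List.pyGetD_natCast, hwin]
  | cons label r ih =>
    have hklt : wi < ls.length := by
      by_contra h
      rw [List.drop_eq_nil_iff.mpr (by omega)] at hdrop; exact (List.cons_ne_nil _ _) hdrop.symm
    have hget : ls[wi]? = some label := by
      have : (ls.drop wi)[0]? = some label := by rw [hdrop]; rfl
      simpa [List.getElem?_drop] using this
    have hgetDl : ls.getD wi "" = label := by simp [List.getD, hget]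
    have hdrop' : ls.drop (wi + 1) = r := by
      have : (ls.drop wi).tail = r := by rw [hdrop]; rfl
      simpa [List.tail_drop] using this
    simp only [pmBnds, pmSegs]
    by_cases h : PySem.Str.startswith label "B-" = true
    · rw [if_pos h, if_pos h]
      simp only [List.cons_append, List.zip_cons_cons, List.map_cons]
      congr 1
      · rw [pmFmt, PySem.List.slice_natCast]
        simp [PySem.List.pyGetD_natCast]
      · have h1 : (wl.drop wi).take (wi + 1 - wi) = [wl.getD wi ' '] := by
          have h2 := take_drop_snoc wl wi wi (le_refl _) (by omega)
          simpa using h2.symm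
        have := ih wi (wi + 1) hdrop' (by omega) (by omega)
        rw [hgetDl, h1] at this
        exact this
    · rw [if_neg h, if_neg h]
      rw [take_drop_snoc wl a wi ha (by omega)]
      exact ih a (wi + 1) hdrop' (by omega) (by omega)

theorem take_one_getD (wl : List Char) (h : 0 < wl.length) :
    wl.take 1 = [wl.getD 0 ' '] := by
  cases wl with
  | nil => simp at h
  | cons c t => simp [List.getD]

-- ===== VERDICT (by name: the statement is the Claim_ definition above) =====
theorem pretty_morpheme_spec : Claim_equal_pretty_morpheme := by
  intro word labels _ hpre
  obtain ⟨hne, hcase⟩ := hpre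
  unfold Spec_pretty_morpheme pretty_morpheme pretty_morpheme_alt
  dsimp only
  by_cases h1 : (word.toList.length == 1) = true
  · rw [if_pos h1, if_pos h1]
  · rw [if_neg h1, if_neg h1]
    have hlen1 : word.toList.length ≠ 1 := by simpa using h1
    rcases hcase with h | ⟨_, hw1, hll⟩
    · exact absurd h hlen1
    have hlsne : 1 ≤ labels.length := List.length_pos_of_ne_nil hne
    rw [pmLoopA_segs]
    unfold pmStartsB
    have hb := pmBnds_filter labels (labels.drop 1) 1 rfl
    rw [Nat.cast_one] at hb
    rw [hb]
    have hz := pmZip_segs word.toList labels (labels.drop 1) 0 1 rfl (by omega) hlsne hll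
    simp only [List.drop_zero, Nat.sub_zero] at hz
    rw [take_one_getD word.toList (by omega)] at hz
    have hhead : labels.getD 0 "" = labels.headD "" := by
      cases labels with
      | nil => rfl
      | cons a t => rfl
    rw [hhead] at hz
    rw [Nat.cast_zero] at hz
    simp only [List.nil_append, List.drop_succ_cons, List.drop_zero]
    rw [hz]
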